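-- pv_equiv track=rewrite | github.com/kamilsokolowski/ststistic_analysis | wszyfr.py | ciag_B_do_int
-- ===== SOURCE A (Python) =====
-- def ciag_B_do_int(ciag):
--     liczba = 0
--     tablica = []
--     for i in range(0, len(ciag)):
--         if ciag[i] == '0':
--             liczba = liczba*2
--         else:
--             liczba = liczba*2 + 1
--         if i%5 == 4:
--             tablica.append(liczba)
--             liczba = 0
--     return tablica
-- ===== SOURCE B (Python) =====
-- def ciag_B_do_int(ciag):
--     tablica = []
--     reszta = ciag
--     while len(reszta) >= 5:
--         blok, reszta = reszta[:5], reszta[5:]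
--         liczba = 0
--         for c in blok:
--             liczba = liczba*2 + (0 if c == '0' else 1)
--         tablica.append(liczba)
--     return tablica
-- ===== Notes on version B (the rewrite author's own statement) =====
-- stated objective: simpler
-- what changed: Replaces A's flat indexed pass with an i%5==4 flush and carried accumulator by a while loop that peels off one 5-character block at a time and reduces each block independently; a trailing partial block is naturally dropped because the loop stops below length 5.
import Mathlib
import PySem

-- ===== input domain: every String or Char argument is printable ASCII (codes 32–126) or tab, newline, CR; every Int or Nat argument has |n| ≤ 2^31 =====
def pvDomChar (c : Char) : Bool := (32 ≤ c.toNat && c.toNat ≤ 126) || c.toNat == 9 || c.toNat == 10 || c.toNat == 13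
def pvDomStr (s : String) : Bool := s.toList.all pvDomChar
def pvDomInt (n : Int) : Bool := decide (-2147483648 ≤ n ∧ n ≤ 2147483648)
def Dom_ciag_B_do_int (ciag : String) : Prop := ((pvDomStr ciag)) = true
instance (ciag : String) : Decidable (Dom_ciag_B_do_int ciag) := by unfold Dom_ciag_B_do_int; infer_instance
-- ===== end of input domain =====

-- B replaces A's flat indexed pass (flush on i%5==4) by a while loop peeling one 5-char block
-- at a time and reducing each block independently (objective: simpler decomposition).

-- ===== PORT A =====
-- A's single for-loop over indices, carrying (i, liczba, tablica); flushes when i%5 == 4.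
def pvALoop : List Char → Nat → Int → List Int → List Int
  | [], _, _, tablica => tablica
  | c :: rest, i, liczba, tablica =>
    let liczba' := if c = '0' then liczba * 2 else liczba * 2 + 1
    if i % 5 = 4 then pvALoop rest (i + 1) 0 (tablica ++ [liczba'])
    else pvALoop rest (i + 1) liczba' tablica

def ciag_B_do_int (ciag : String) : List Int :=
  pvALoop ciag.toList 0 0 []

-- ===== PORT B =====
-- inner for-loop of B: reduce one block to an integer
def pvBlokVal (blok : List Char) : Int :=
  blok.foldl (fun liczba c => liczba * 2 + (if c = '0' then 0 else 1)) 0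

-- B's while loop: peel 5 chars while at least 5 remain, append the block's value
def pvBLoop (reszta : List Char) (tablica : List Int) : List Int :=
  if 5 ≤ reszta.length then
    pvBLoop (reszta.drop 5) (tablica ++ [pvBlokVal (reszta.take 5)])
  else tablica
termination_by reszta.length
decreasing_by simp; omega

def ciag_B_do_int_alt (ciag : String) : List Int :=
  pvBLoop ciag.toList []

-- ===== PRECONDITION & SPEC =====
def Spec_ciag_B_do_int (ciag : String) (out : List Int) : Prop := out = ciag_B_do_int_alt ciag
instance (ciag : String) (out : List Int) : Decidable (Spec_ciag_B_do_int ciag out) := by unfold Spec_ciag_B_do_int; infer_instance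

-- ===== CLAIM (what is proved, stated in full; the proofs are below) =====
def Claim_equal_ciag_B_do_int : Prop := ∀ (ciag : String), Dom_ciag_B_do_int ciag → Spec_ciag_B_do_int ciag (ciag_B_do_int ciag)

-- ===== LEMMAS AND PROOFS =====

-- A's loop depends on the index only through i % 5
theorem pvALoop_mod (cs : List Char) : ∀ (i j : Nat) (l : Int) (t : List Int),
    i % 5 = j % 5 → pvALoop cs i l t = pvALoop cs j l t := by
  induction cs with
  | nil => intro i j l t _; rfl
  | cons c rest ih =>
    intro i j l t h
    simp only [pvALoop, h]
    split <;> exact ih _ _ _ _ (by omega)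

-- fewer than the remaining room in the current block: no flush happens
theorem pvALoop_short (cs : List Char) : ∀ (i : Nat) (l : Int) (t : List Int),
    cs.length + i % 5 < 5 → pvALoop cs i l t = t := by
  induction cs with
  | nil => intro i l t _; rfl
  | cons c rest ih =>
    intro i l t h
    simp only [List.length_cons] at h
    have h4 : i % 5 ≠ 4 := by omega
    simp only [pvALoop, h4, if_false]
    exact ih _ _ _ (by omega)

theorem pv_main (n : Nat) : ∀ (cs : List Char), cs.length ≤ n →
    ∀ (t : List Int), pvALoop cs 0 0 t = pvBLoop cs t := by
  induction n with
  | zero =>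
    intro cs hlen t
    have : cs = [] := List.eq_nil_of_length_eq_zero (by omega)
    subst this
    rw [pvBLoop]; rfl
  | succ n ih =>
    intro cs hlen t
    by_cases h5 : 5 ≤ cs.length
    · match cs, h5 with
      | c1 :: c2 :: c3 :: c4 :: c5 :: rest, _ =>
        rw [pvBLoop]
        simp only [List.length_cons]
        rw [if_pos (by omega)]
        simp only [pvALoop, List.take, List.drop, pvBlokVal, List.foldl]
        norm_num
        rw [pvALoop_mod rest 5 0 _ _ (by norm_num)]
        rw [ih rest (by simp at hlen ⊢; omega)]
        congr 2
        split_ifs <;> ring_nf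
    · rw [pvBLoop, if_neg h5, pvALoop_short cs 0 0 t (by omega)]

-- ===== VERDICT (by name: the statement is the Claim_ definition above) =====
theorem ciag_B_do_int_spec : Claim_equal_ciag_B_do_int := by
  intro ciag _
  unfold Spec_ciag_B_do_int ciag_B_do_int ciag_B_do_int_alt
  exact pv_main ciag.toList.length ciag.toList le_rfl []
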